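-- pv_equiv track=rewrite | github.com/jinhaoduan/GTBench | gamingbench/games/breakthrough.py | rank_action_mixed_base
-- ===== SOURCE A (Python) =====
-- def rank_action_mixed_base(digits):
--     bases = [8, 3, 6, 2]
--     action = 0
--     one_plus_max = 1
--     for i in range(len(digits) - 1, -1, -1):
--         action += digits[i] * one_plus_max
--         one_plus_max *= bases[i]
--     return action
-- ===== SOURCE B (Python) =====
-- def rank_action_mixed_base(digits):
--     bases = [8, 3, 6, 2]
--     action = 0
--     for i in range(len(digits)):
--         action = action * bases[i] + digits[i]
--     return action
-- ===== Notes on version B (the rewrite author's own statement) =====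
-- stated objective: simpler
-- what changed: Replaces the backward least-significant-first pass that maintains two accumulators (running sum and place-value product) with a forward Horner evaluation maintaining a single running value.
import Mathlib
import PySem

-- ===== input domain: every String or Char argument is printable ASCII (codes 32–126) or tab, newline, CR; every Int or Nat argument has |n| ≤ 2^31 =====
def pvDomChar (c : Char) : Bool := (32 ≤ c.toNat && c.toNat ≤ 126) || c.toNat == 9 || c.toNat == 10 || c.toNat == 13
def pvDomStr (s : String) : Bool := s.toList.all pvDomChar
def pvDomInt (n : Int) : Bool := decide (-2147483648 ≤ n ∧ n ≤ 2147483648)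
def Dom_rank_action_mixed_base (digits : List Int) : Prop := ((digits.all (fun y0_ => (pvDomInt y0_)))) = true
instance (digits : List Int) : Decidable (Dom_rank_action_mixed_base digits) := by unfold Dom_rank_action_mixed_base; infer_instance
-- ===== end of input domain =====

-- B replaces A's backward two-accumulator pass by a forward Horner evaluation with one running value; return-value equivalence on lists of length ≤ 4 (both raise IndexError beyond).

-- ===== PORT A =====
-- A: iterate i from len-1 down to 0, keeping (action, one_plus_max)
def rank_action_mixed_base (digits : List Int) : Int :=
  let bases : List Int := [8, 3, 6, 2]
  ((PySem.List.pyRange ((digits.length : Int) - 1) (-1) (-1)).foldl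
    (fun (st : Int × Int) i =>
      ((st.1 + ((PySem.List.pyGet? digits i).getD 0) * st.2),
       (st.2 * ((PySem.List.pyGet? bases i).getD 0))))
    (0, 1)).1

-- ===== PORT B =====
-- B: forward Horner: action = action * bases[i] + digits[i]
def rank_action_mixed_base_alt (digits : List Int) : Int :=
  let bases : List Int := [8, 3, 6, 2]
  (PySem.List.pyRange 0 (digits.length : Int) 1).foldl
    (fun action i =>
      action * ((PySem.List.pyGet? bases i).getD 0) + ((PySem.List.pyGet? digits i).getD 0))
    0

-- ===== PRECONDITION & SPEC =====
-- Pre_: A raises IndexError (bases[i]) when len(digits) > 4; excluded (B raises there too).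
def Pre_rank_action_mixed_base (digits : List Int) : Prop := digits.length ≤ 4
instance (digits : List Int) : Decidable (Pre_rank_action_mixed_base digits) := by unfold Pre_rank_action_mixed_base; infer_instance
def pvWitness_rank_action_mixed_base : List Int := [3, 2, 5, 1]
def Spec_rank_action_mixed_base (digits : List Int) (out : Int) : Prop := out = rank_action_mixed_base_alt digits
instance (digits : List Int) (out : Int) : Decidable (Spec_rank_action_mixed_base digits out) := by unfold Spec_rank_action_mixed_base; infer_instance

-- ===== CLAIM (what is proved, stated in full; the proofs are below) =====
def Claim_equal_rank_action_mixed_base : Prop := ∀ (digits : List Int), Dom_rank_action_mixed_base digits → Pre_rank_action_mixed_base digits → Spec_rank_action_mixed_base digits (rank_action_mixed_base digits)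

-- ===== LEMMAS AND PROOFS =====

-- ===== VERDICT (by name: the statement is the Claim_ definition above) =====
theorem rank_action_mixed_base_spec : Claim_equal_rank_action_mixed_base := by
  intro digits _ hpre
  unfold Spec_rank_action_mixed_base
  match digits with
  | [] => decide
  | [a] =>
      simp [rank_action_mixed_base, rank_action_mixed_base_alt, PySem.List.pyRange,
            PySem.List.pyGet?, PySem.List.pyIdx?, List.range_succ]
  | [a, b] =>
      simp [rank_action_mixed_base, rank_action_mixed_base_alt, PySem.List.pyRange,
            PySem.List.pyGet?, PySem.List.pyIdx?, List.range_succ]; ring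
  | [a, b, c] =>
      simp [rank_action_mixed_base, rank_action_mixed_base_alt, PySem.List.pyRange,
            PySem.List.pyGet?, PySem.List.pyIdx?, List.range_succ]; ring
  | [a, b, c, d] =>
      simp [rank_action_mixed_base, rank_action_mixed_base_alt, PySem.List.pyRange,
            PySem.List.pyGet?, PySem.List.pyIdx?, List.range_succ]; ring
  | _ :: _ :: _ :: _ :: _ :: _ =>
      exact absurd hpre (by simp [Pre_rank_action_mixed_base])
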